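-- pv_equiv track=rewrite | github.com/choderalab/integrator-benchmark | benchmark/utilities/mts_utilities.py | generate_baoab_mts_string
-- ===== SOURCE A (Python) =====
-- def generate_baoab_mts_string(groups, K_r=1):
--     """Multi timestep generalization of the solvent-solute splitting scheme presented above...
--
--     In the solvent-solute splitting, we have a "fast" group and a "slow" group.
--     What if we have more than two groups?
--
--     In the the straightforard generalization of the solvent-solute scheme, we do something like this:
--
--     Accept groups, a list of 2-tuples, where each tuple contains an iterable of force group indices and
--     an execution-frequency ratio.
--
--     For example, groups=[([0], 1), ([1], 2), ([2], 2)] should be taken to mean: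
--         execute V1 twice as often as V0, and execute V2 twices as often as V1....
--
--         To be concrete:
--
--         If groups=[([0], 1), ([1], 2), ([2], 2)], K_r=1 we would have:
--
--                 V0 (V1 (V2 R^K_r O R^K_r V2)^2 V1)^2 V0
--
--     """
--     Rs = ["R"] * K_r
--
--     ratios = [group[1] for group in groups]
--     forces = [["V{}".format(i) for i in group[0]] for group in groups]
--
--     inner_loop_string = forces[-1] + Rs + ["O"] + Rs + forces[-1]
--
--     for i in range(len(ratios))[::-1][1:]:
--         inner_loop_string = forces[i] + inner_loop_string * ratios[i - 1] + forces[i]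
--
--     return " ".join(inner_loop_string)
-- ===== SOURCE B (Python) =====
-- def generate_baoab_mts_string(groups, K_r=1):
--     """Recursive decomposition: build(i) yields the token list for levels i..n-1."""
--     ratios = [group[1] for group in groups]
--     forces = [["V{}".format(i) for i in group[0]] for group in groups]
--     Rs = ["R"] * K_r
--     n = len(forces)
--
--     def build(i):
--         if i + 1 < n:
--             return forces[i] + build(i + 1) * ratios[i - 1] + forces[i]
--         return forces[-1] + Rs + ["O"] + Rs + forces[-1]
--
--     return " ".join(build(0))
-- ===== Notes on version B (the rewrite author's own statement) =====
-- stated objective: alternative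
-- what changed: Replaces A's reversed index loop that rewraps an accumulated token list with a recursive helper build(i) that constructs the pattern for levels i..n-1 top-down.
-- outside the precondition, e.g. on generate_baoab_mts_string([], 1): A raises IndexError, B raises IndexError
import Mathlib
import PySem

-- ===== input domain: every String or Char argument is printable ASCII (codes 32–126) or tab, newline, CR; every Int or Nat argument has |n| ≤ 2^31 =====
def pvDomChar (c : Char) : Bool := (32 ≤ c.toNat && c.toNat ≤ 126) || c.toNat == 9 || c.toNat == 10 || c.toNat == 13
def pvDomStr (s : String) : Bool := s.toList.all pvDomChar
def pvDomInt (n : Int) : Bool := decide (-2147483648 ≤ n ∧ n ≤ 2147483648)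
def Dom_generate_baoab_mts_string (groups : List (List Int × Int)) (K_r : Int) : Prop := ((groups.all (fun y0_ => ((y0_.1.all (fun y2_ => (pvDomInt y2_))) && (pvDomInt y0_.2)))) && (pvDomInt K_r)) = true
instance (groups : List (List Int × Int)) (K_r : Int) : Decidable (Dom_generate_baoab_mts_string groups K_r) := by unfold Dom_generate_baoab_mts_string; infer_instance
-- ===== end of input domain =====

-- B replaces A's reversed index loop by a structural recursion over group levels (different decomposition; same cost).
-- Both A and B raise IndexError on groups = []; Pre_ excludes exactly that input.

-- ===== PORT A =====
-- literal transliteration of A: build base pattern, then fold over indices [n-2, …, 0]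
def generate_baoab_mts_string (groups : List (List Int × Int)) (K_r : Int) : String :=
  let Rs : List String := PySem.List.pyRepeat ["R"] K_r
  let ratios : List Int := groups.map (fun group => group.2)
  let forces : List (List String) := groups.map (fun group => group.1.map (fun i => "V" ++ PySem.Int.toStr i))
  let fLast : List String := (PySem.List.pyGet? forces (-1)).getD []   -- forces[-1]; none (IndexError) excluded by Pre_
  let base : List String := fLast ++ Rs ++ ["O"] ++ Rs ++ fLast
  let inner : List String :=
    ((List.range ratios.length).reverse.drop 1).foldl
      (fun st i =>
        ((PySem.List.pyGet? forces (Int.ofNat i)).getD []) ++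
          PySem.List.pyRepeat st ((PySem.List.pyGet? ratios ((Int.ofNat i) - 1)).getD 0) ++
          ((PySem.List.pyGet? forces (Int.ofNat i)).getD []))
      base
  PySem.Str.join " " inner

-- ===== PORT B =====
-- recursive helper: token list for levels i..n-1 (Source B's build)
def pvBuild (forces : List (List String)) (ratios : List Int) (Rs : List String) (i : Nat) : List String :=
  if i + 1 < forces.length then
    ((PySem.List.pyGet? forces (Int.ofNat i)).getD []) ++
      PySem.List.pyRepeat (pvBuild forces ratios Rs (i + 1))
        ((PySem.List.pyGet? ratios ((Int.ofNat i) - 1)).getD 0) ++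
      ((PySem.List.pyGet? forces (Int.ofNat i)).getD [])
  else
    ((PySem.List.pyGet? forces (-1)).getD []) ++ Rs ++ ["O"] ++ Rs ++ ((PySem.List.pyGet? forces (-1)).getD [])
termination_by forces.length - i

def generate_baoab_mts_string_alt (groups : List (List Int × Int)) (K_r : Int) : String :=
  let ratios : List Int := groups.map (fun group => group.2)
  let forces : List (List String) := groups.map (fun group => group.1.map (fun i => "V" ++ PySem.Int.toStr i))
  let Rs : List String := PySem.List.pyRepeat ["R"] K_r
  PySem.Str.join " " (pvBuild forces ratios Rs 0)

-- ===== PRECONDITION & SPEC =====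
-- A (and B) raise IndexError on groups = [] (forces[-1] on an empty list); that input is excluded.
def Pre_generate_baoab_mts_string (groups : List (List Int × Int)) (K_r : Int) : Prop := groups ≠ []
instance (groups : List (List Int × Int)) (K_r : Int) : Decidable (Pre_generate_baoab_mts_string groups K_r) := by unfold Pre_generate_baoab_mts_string; infer_instance

def pvWitness_generate_baoab_mts_string : (List (List Int × Int)) × Int := ([([0], 1), ([1], 2), ([2], 2)], 1)

def Spec_generate_baoab_mts_string (groups : List (List Int × Int)) (K_r : Int) (out : String) : Prop := out = generate_baoab_mts_string_alt groups K_r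
instance (groups : List (List Int × Int)) (K_r : Int) (out : String) : Decidable (Spec_generate_baoab_mts_string groups K_r out) := by unfold Spec_generate_baoab_mts_string; infer_instance

-- ===== CLAIM (what is proved, stated in full; the proofs are below) =====
def Claim_equal_generate_baoab_mts_string : Prop := ∀ (groups : List (List Int × Int)) (K_r : Int), Dom_generate_baoab_mts_string groups K_r → Pre_generate_baoab_mts_string groups K_r → Spec_generate_baoab_mts_string groups K_r (generate_baoab_mts_string groups K_r)

-- ===== LEMMAS AND PROOFS =====

-- The fold of A's step over [i-1, …, 0] starting from pvBuild … i yields pvBuild … 0.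
theorem pvFold_build (forces : List (List String)) (ratios : List Int) (Rs : List String) :
    ∀ i : Nat, i + 1 ≤ forces.length →
      ((List.range i).reverse).foldl
        (fun st j =>
          ((PySem.List.pyGet? forces (Int.ofNat j)).getD []) ++
            PySem.List.pyRepeat st ((PySem.List.pyGet? ratios ((Int.ofNat j) - 1)).getD 0) ++
            ((PySem.List.pyGet? forces (Int.ofNat j)).getD []))
        (pvBuild forces ratios Rs i) = pvBuild forces ratios Rs 0 := by
  intro i
  induction i with
  | zero => intro _; simp
  | succ k ih =>
    intro h
    have : (List.range (k + 1)).reverse = k :: (List.range k).reverse := by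
      simp [List.range_succ]
    rw [this, List.foldl_cons]
    have hb : pvBuild forces ratios Rs k =
        ((PySem.List.pyGet? forces (Int.ofNat k)).getD []) ++
          PySem.List.pyRepeat (pvBuild forces ratios Rs (k + 1))
            ((PySem.List.pyGet? ratios ((Int.ofNat k) - 1)).getD 0) ++
          ((PySem.List.pyGet? forces (Int.ofNat k)).getD []) := by
      rw [pvBuild, if_pos (show k + 1 < forces.length from h)]
    rw [← hb]
    exact ih (by omega)

-- ===== VERDICT (by name: the statement is the Claim_ definition above) =====
theorem generate_baoab_mts_string_spec : Claim_equal_generate_baoab_mts_string := by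
  intro groups K_r _ hpre
  have hn : 0 < groups.length := List.length_pos_iff.mpr hpre
  unfold Spec_generate_baoab_mts_string generate_baoab_mts_string generate_baoab_mts_string_alt
  simp only [List.length_map]
  congr 1
  have hdrop : (List.range groups.length).reverse.drop 1 = (List.range (groups.length - 1)).reverse := by
    obtain ⟨m, hm⟩ : ∃ m, groups.length = m + 1 := ⟨groups.length - 1, by omega⟩
    rw [hm]
    simp [List.range_succ]
  rw [hdrop]
  have hc : ¬ (groups.length - 1 + 1 < (groups.map (fun group => group.1.map (fun i => "V" ++ PySem.Int.toStr i))).length) := by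
    simp only [List.length_map]; omega
  have hbase :
      ((PySem.List.pyGet? (groups.map (fun group => group.1.map (fun i => "V" ++ PySem.Int.toStr i))) (-1)).getD []) ++
        PySem.List.pyRepeat ["R"] K_r ++ ["O"] ++ PySem.List.pyRepeat ["R"] K_r ++
        ((PySem.List.pyGet? (groups.map (fun group => group.1.map (fun i => "V" ++ PySem.Int.toStr i))) (-1)).getD []) =
      pvBuild (groups.map (fun group => group.1.map (fun i => "V" ++ PySem.Int.toStr i)))
        (groups.map (fun group => group.2)) (PySem.List.pyRepeat ["R"] K_r)
        (groups.length - 1) := by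
    conv_rhs => rw [pvBuild]
    rw [if_neg hc]
  rw [hbase]
  exact pvFold_build _ _ _ (groups.length - 1) (by simp only [List.length_map]; omega)
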